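-- pv_equiv track=rewrite | github.com/Asutherland8219/TMU_assignments | Completed/candy_share.py | candy_share
-- ===== SOURCE A (Python) =====
-- def candy_share(candies):
--     n = len(candies)
--     index = 0
--     while True:
--         if not any(i >= 2 for i in candies):
--             return index
--         index += 1
--         new_candies = [0] * n
--         for x in range(n):
--             if candies[x] >= 2:
--                 candies[x] -= 2
--                 if x == n - 1:
--                     new_candies[x - 1] += 1
--                     new_candies[0] += 1
--                 else:
--                     new_candies[x - 1] += 1
--                     new_candies[x + 1] += 1
--             new_candies[x] += candies[x]
--         candies = new_candies
-- ===== SOURCE B (Python) =====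
-- def candy_share(candies):
--     # Event-driven (worklist) simulation: keep the set of active cells (>= 2
--     # candies); each round apply every active cell's firing directly to the
--     # state (the updates commute, so order is irrelevant) and rebuild the next
--     # active set from only the cells touched this round.
--     c = list(candies)
--     n = len(c)
--     active = {i for i in range(n) if c[i] >= 2}
--     rounds = 0
--     while active:
--         rounds += 1
--         touched = set()
--         for i in active:
--             c[i] -= 2
--             c[(i - 1) % n] += 1
--             c[(i + 1) % n] += 1
--             touched.add(i)
--             touched.add((i - 1) % n)
--             touched.add((i + 1) % n)
--         active = {j for j in touched if c[j] >= 2}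
--     return rounds
-- ===== Notes on version B (the rewrite author's own statement) =====
-- stated objective: alternative
-- what changed: A rescans the whole array each round and rebuilds it cell by cell with special-cased wrap indices; B is an event-driven worklist simulation: it maintains the set of active (firing) cells, applies each active cell's commuting in-place updates directly, and rebuilds the next active set from only the cells touched this round.
import Mathlib
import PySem

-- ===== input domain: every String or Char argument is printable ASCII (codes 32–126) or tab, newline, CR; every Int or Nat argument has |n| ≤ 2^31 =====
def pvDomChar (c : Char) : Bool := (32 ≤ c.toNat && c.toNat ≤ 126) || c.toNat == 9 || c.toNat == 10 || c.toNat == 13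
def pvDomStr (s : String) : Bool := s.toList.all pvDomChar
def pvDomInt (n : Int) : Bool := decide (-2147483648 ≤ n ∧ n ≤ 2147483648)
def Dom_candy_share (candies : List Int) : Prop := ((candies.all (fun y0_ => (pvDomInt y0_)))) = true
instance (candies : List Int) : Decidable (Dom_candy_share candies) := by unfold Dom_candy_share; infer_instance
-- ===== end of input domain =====

-- B replaces A's full rescan-and-rebuild round by an event-driven worklist round (active set of
-- firing cells, in-place additive updates, next active set rebuilt from the touched cells only);
-- equivalence is about the return value only — Python A also mutates the caller's list during
-- the first round, B copies it first.
-- Both Pythons run an unbounded `while` and loop forever on some inputs (e.g. [2, 0]); the ports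
-- drive the same loop scaffold with the same generous fuel, ample wherever the Python loop
-- terminates, and the two ports agree on every input either way.

-- ===== PORT A =====
-- new_candies[i] += v  (all indices used are in range)
def pvAddAt (l : List Int) (i : Nat) (v : Int) : List Int := l.set i (l.getD i 0 + v)

-- the body of A's inner `for x in range(n)` loop, state = (candies, new_candies)
def pvStepA (n : Nat) (st : List Int × List Int) (x : Nat) : List Int × List Int :=
  if 2 ≤ st.1.getD x 0 then
    let cand := st.1.set x (st.1.getD x 0 - 2)                -- candies[x] -= 2
    let nc :=
      if x = n - 1 then
        pvAddAt (pvAddAt st.2 (x - 1) 1) 0 1                  -- new[x-1] += 1; new[0] += 1  (n=1: new[-1] is new[0], and x-1=0)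
      else
        pvAddAt (pvAddAt st.2 (if x = 0 then n - 1 else x - 1) 1) (x + 1) 1
                                                              -- new[x-1] += 1 (x=0: index -1 wraps to last); new[x+1] += 1
    (cand, pvAddAt nc x (cand.getD x 0))                      -- new[x] += candies[x] (decremented)
  else (st.1, pvAddAt st.2 x (st.1.getD x 0))                 -- new[x] += candies[x]

def pvRoundA (c : List Int) : List Int :=
  ((List.range c.length).foldl (pvStepA c.length) (c, List.replicate c.length 0)).2

-- fuel for the `while True` loop
def pvFuel (c : List Int) : Nat :=
  ((c.foldl (fun s v => s + max v 0) 0).toNat + c.length + 2) * (c.length + 2)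

def pvLoopA : Nat → Int → List Int → Int
  | 0, index, _ => index                                       -- fuel exhausted: only where the Python loops forever
  | fuel + 1, index, c =>
      if c.any (fun v => decide (2 ≤ v)) then pvLoopA fuel (index + 1) (pvRoundA c)
      else index                                               -- `if not any(i >= 2 …): return index`

def candy_share (candies : List Int) : Int := pvLoopA (pvFuel candies) 0 candies

-- ===== PORT B =====
-- the body of B's `for i in active` loop: fire cell i into the state, record the touched cells
def pvFireB (n : Nat) (st : List Int × PySem.Set Nat) (i : Nat) : List Int × PySem.Set Nat :=
  let pv := (PySem.Int.mod ((i : Int) - 1) (n : Int)).toNat   -- (i - 1) % n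
  let nx := (PySem.Int.mod ((i : Int) + 1) (n : Int)).toNat   -- (i + 1) % n
  let c := pvAddAt (pvAddAt (pvAddAt st.1 i (-2)) pv 1) nx 1  -- c[i]-=2; c[(i-1)%n]+=1; c[(i+1)%n]+=1
  (c, PySem.Set.add (PySem.Set.add (PySem.Set.add st.2 i) pv) nx)

-- B's `while active:` loop; state = (rounds, c, active)
def pvLoopB (n : Nat) : Nat → Int → List Int → List Nat → Int
  | 0, rounds, _, _ => rounds
  | fuel + 1, rounds, c, active =>
      if active = [] then rounds
      else
        let st := active.foldl (pvFireB n) (c, PySem.Set.empty)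
        pvLoopB n fuel (rounds + 1) st.1
          (st.2.filter (fun j => decide (2 ≤ st.1.getD j 0)))  -- {j for j in touched if c[j] >= 2}

def candy_share_alt (candies : List Int) : Int :=
  pvLoopB candies.length (pvFuel candies) 0 candies
    ((List.range candies.length).filter (fun i => decide (2 ≤ candies.getD i 0)))

-- ===== PRECONDITION & SPEC =====
def Spec_candy_share (candies : List Int) (out : Int) : Prop := out = candy_share_alt candies
instance (candies : List Int) (out : Int) : Decidable (Spec_candy_share candies out) := by
  unfold Spec_candy_share; infer_instance

-- ===== CLAIM =====
def Claim_equal_candy_share : Prop :=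
  ∀ (candies : List Int), Dom_candy_share candies → Spec_candy_share candies (candy_share candies)

-- ===== LEMMAS AND PROOFS =====

-- cyclic successor / predecessor of j in [0, n)
def pvNx (n j : Nat) : Nat := if j + 1 = n then 0 else j + 1
def pvPv (n j : Nat) : Nat := if j = 0 then n - 1 else j - 1

-- what firing cell i contributes to cell j
def pvContrib (n j i : Nat) : Int :=
  (if j = i then -2 else 0) + (if j = pvPv n i then 1 else 0) + (if j = pvNx n i then 1 else 0)

-- the invariant B's loop maintains: active is exactly the set of cells with ≥ 2 candies
def pvInv (n : Nat) (c : List Int) (active : List Nat) : Prop :=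
  c.length = n ∧ active.Nodup ∧ (∀ i ∈ active, i < n) ∧
    (∀ j, j < n → (j ∈ active ↔ 2 ≤ c.getD j 0))

-- closed forms of the foldl state after the first k steps of pvRoundA
def pvCandK (c : List Int) (k : Nat) : List Int :=
  (List.range c.length).map (fun i => c.getD i 0 - if i < k ∧ 2 ≤ c.getD i 0 then 2 else 0)

def pvNewK (c : List Int) (k : Nat) : List Int :=
  (List.range c.length).map (fun j =>
    (if j < k then c.getD j 0 - (if 2 ≤ c.getD j 0 then 2 else 0) else 0)
    + (if 2 ≤ c.getD (pvNx c.length j) 0 ∧ pvNx c.length j < k then 1 else 0)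
    + (if 2 ≤ c.getD (pvPv c.length j) 0 ∧ pvPv c.length j < k then 1 else 0))

lemma pvNx_lt {n j : Nat} (hj : j < n) : pvNx n j < n := by
  unfold pvNx; split <;> omega

lemma pvPv_lt {n j : Nat} (hj : j < n) : pvPv n j < n := by
  unfold pvPv; split <;> omega

lemma pvNx_eq_iff {n j k : Nat} (hj : j < n) (hk : k < n) :
    pvNx n j = k ↔ j = pvPv n k := by
  unfold pvNx pvPv; split <;> split <;> omega

lemma pvPv_eq_iff {n j k : Nat} (hj : j < n) (hk : k < n) :
    pvPv n j = k ↔ j = pvNx n k := by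
  unfold pvNx pvPv; split <;> split <;> omega

lemma length_pvAddAt (l : List Int) (i : Nat) (v : Int) :
    (pvAddAt l i v).length = l.length := by
  simp [pvAddAt]

lemma getD_set_ite (l : List Int) (i j : Nat) (v : Int) (hi : i < l.length) :
    (l.set i v).getD j 0 = if j = i then v else l.getD j 0 := by
  by_cases h : j = i
  · subst h
    simp [List.getD_eq_getElem?_getD, hi]
  · simp [List.getD_eq_getElem?_getD, List.getElem?_set_ne (by omega : i ≠ j), h]

lemma getD_pvAddAt (l : List Int) (i j : Nat) (v : Int) (hi : i < l.length) :
    (pvAddAt l i v).getD j 0 = l.getD j 0 + if j = i then v else 0 := by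
  unfold pvAddAt
  rw [getD_set_ite l i j _ hi]
  by_cases h : j = i
  · subst h; simp
  · simp [h]

lemma getD_pvCandK (c : List Int) (k j : Nat) (hj : j < c.length) :
    (pvCandK c k).getD j 0 = c.getD j 0 - if j < k ∧ 2 ≤ c.getD j 0 then 2 else 0 := by
  simp [pvCandK, List.getD_eq_getElem?_getD, hj]

lemma getD_pvNewK (c : List Int) (k j : Nat) (hj : j < c.length) :
    (pvNewK c k).getD j 0 =
      (if j < k then c.getD j 0 - (if 2 ≤ c.getD j 0 then 2 else 0) else 0)
      + (if 2 ≤ c.getD (pvNx c.length j) 0 ∧ pvNx c.length j < k then 1 else 0)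
      + (if 2 ≤ c.getD (pvPv c.length j) 0 ∧ pvPv c.length j < k then 1 else 0) := by
  simp [pvNewK, List.getD_eq_getElem?_getD, hj]

-- list equality through getD (all our lists have in-range access)
lemma pvGetDext {l₁ l₂ : List Int} (hlen : l₁.length = l₂.length)
    (h : ∀ j, j < l₁.length → l₁.getD j 0 = l₂.getD j 0) : l₁ = l₂ := by
  apply List.ext_getElem hlen
  intro j hj hj'
  have := h j hj
  rwa [List.getD_eq_getElem _ _ hj, List.getD_eq_getElem _ _ hj'] at this

-- one step of A from the closed-form state
set_option maxHeartbeats 1000000 in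
lemma pvStepA_inv (c : List Int) (k : Nat) (hk : k < c.length) :
    pvStepA c.length (pvCandK c k, pvNewK c k) k = (pvCandK c (k + 1), pvNewK c (k + 1)) := by
  have hn : 0 < c.length := by omega
  have hcand : (pvCandK c k).getD k 0 = c.getD k 0 := by
    rw [getD_pvCandK c k k hk]; simp
  have hlenC : (pvCandK c k).length = c.length := by simp [pvCandK]
  have hlenN : (pvNewK c k).length = c.length := by simp [pvNewK]
  have hpv := pvPv_lt hk
  have hnx := pvNx_lt hk
  by_cases h2 : 2 ≤ c.getD k 0
  · -- this cell fires
    have hncEq :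
        (if k = c.length - 1 then
          pvAddAt (pvAddAt (pvNewK c k) (k - 1) 1) 0 1
        else
          pvAddAt (pvAddAt (pvNewK c k) (if k = 0 then c.length - 1 else k - 1) 1) (k + 1) 1)
        = pvAddAt (pvAddAt (pvNewK c k) (pvPv c.length k) 1) (pvNx c.length k) 1 := by
      unfold pvPv pvNx
      split_ifs <;> first | rfl | (congr 2 <;> omega)
    have hsetget :
        ((pvCandK c k).set k (c.getD k 0 - 2)).getD k 0 = c.getD k 0 - 2 := by
      rw [getD_set_ite _ _ _ _ (by omega)]; simp
    simp only [pvStepA]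
    rw [hcand, if_pos h2, hncEq, hsetget]
    refine Prod.ext ?_ ?_
    · -- candies component
      apply pvGetDext (by simp [pvCandK])
      intro j hj
      rw [List.length_set, hlenC] at hj
      rw [getD_set_ite _ _ _ _ (by omega), getD_pvCandK c k j hj, getD_pvCandK c (k + 1) j hj]
      by_cases hjk : j = k
      · subst hjk; split_ifs <;> omega
      · split_ifs <;> omega
    · -- new_candies component
      apply pvGetDext (by simp [pvAddAt, pvNewK])
      intro j hj
      rw [length_pvAddAt, length_pvAddAt, length_pvAddAt, hlenN] at hj
      rw [getD_pvAddAt _ _ _ _ (by rw [length_pvAddAt, length_pvAddAt, hlenN]; omega),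
          getD_pvAddAt _ _ _ _ (by rw [length_pvAddAt, hlenN]; omega),
          getD_pvAddAt _ _ _ _ (by omega),
          getD_pvNewK c k j hj, getD_pvNewK c (k + 1) j hj]
      simp only [show (j = pvPv c.length k) ↔ pvNx c.length j = k from (pvNx_eq_iff hj hk).symm,
                 show (j = pvNx c.length k) ↔ pvPv c.length j = k from (pvPv_eq_iff hj hk).symm]
      by_cases hjk : j = k
      · subst hjk
        by_cases hA : pvNx c.length j = j
        · rw [hA]
          by_cases hB : pvPv c.length j = j
          · rw [hB]; split_ifs <;> omega
          · split_ifs <;> omega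
        · by_cases hB : pvPv c.length j = j
          · rw [hB]; split_ifs <;> omega
          · split_ifs <;> omega
      · by_cases hA : pvNx c.length j = k
        · rw [hA]
          by_cases hB : pvPv c.length j = k
          · rw [hB]; split_ifs <;> omega
          · split_ifs <;> omega
        · by_cases hB : pvPv c.length j = k
          · rw [hB]; split_ifs <;> omega
          · split_ifs <;> omega
  · -- this cell does not fire
    simp only [pvStepA]
    rw [hcand, if_neg h2]
    refine Prod.ext ?_ ?_
    · apply pvGetDext (by simp [pvCandK])
      intro j hj
      rw [hlenC] at hj
      rw [getD_pvCandK c k j hj, getD_pvCandK c (k + 1) j hj]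
      by_cases hjk : j = k
      · subst hjk; split_ifs <;> omega
      · split_ifs <;> omega
    · apply pvGetDext (by simp [pvAddAt, pvNewK])
      intro j hj
      rw [length_pvAddAt, hlenN] at hj
      rw [getD_pvAddAt _ _ _ _ (by omega),
          getD_pvNewK c k j hj, getD_pvNewK c (k + 1) j hj]
      by_cases hjk : j = k
      · subst hjk
        by_cases hA : pvNx c.length j = j
        · rw [hA]
          by_cases hB : pvPv c.length j = j
          · rw [hB]; split_ifs <;> omega
          · split_ifs <;> omega
        · by_cases hB : pvPv c.length j = j
          · rw [hB]; split_ifs <;> omega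
          · split_ifs <;> omega
      · by_cases hA : pvNx c.length j = k
        · rw [hA]
          by_cases hB : pvPv c.length j = k
          · rw [hB]; split_ifs <;> omega
          · split_ifs <;> omega
        · by_cases hB : pvPv c.length j = k
          · rw [hB]; split_ifs <;> omega
          · split_ifs <;> omega

lemma pvRoundA_invariant (c : List Int) (k : Nat) (hk : k ≤ c.length) :
    (List.range k).foldl (pvStepA c.length) (c, List.replicate c.length 0)
      = (pvCandK c k, pvNewK c k) := by
  induction k with
  | zero =>
      simp only [List.range_zero, List.foldl_nil]
      refine Prod.ext ?_ ?_
      · apply pvGetDext (by simp [pvCandK])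
        intro j hj
        rw [getD_pvCandK c 0 j (by simpa using hj)]
        simp
      · apply pvGetDext (by simp [pvNewK])
        intro j hj
        rw [getD_pvNewK c 0 j (by simpa using hj)]
        simp
  | succ k ih =>
      rw [List.range_succ, List.foldl_append, ih (by omega), List.foldl_cons, List.foldl_nil]
      exact pvStepA_inv c k (by omega)

-- Python (i - 1) % n and (i + 1) % n as cyclic predecessor / successor
lemma pvMod_pred (n j : Nat) (hj : j < n) :
    (PySem.Int.mod ((j : Int) - 1) (n : Int)).toNat = pvPv n j := by
  rw [PySem.Int.mod_eq_emod_of_pos (by omega)]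
  have h : ((j : Int) - 1) % (n : Int) = ((pvPv n j : Nat) : Int) := by
    unfold pvPv
    split
    · subst_vars
      have h1 : ((0 : Int) - 1) % (n : Int) = ((n : Int) - 1 - n) % n := by norm_num
      rw [Nat.cast_zero, h1, Int.sub_emod_right, Int.emod_eq_of_lt (by omega) (by omega)]
      omega
    · rw [Int.emod_eq_of_lt (by omega) (by omega)]; omega
  rw [h, Int.toNat_natCast]

lemma pvMod_succ (n j : Nat) (hj : j < n) :
    (PySem.Int.mod ((j : Int) + 1) (n : Int)).toNat = pvNx n j := by
  rw [PySem.Int.mod_eq_emod_of_pos (by omega)]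
  have h : ((j : Int) + 1) % (n : Int) = ((pvNx n j : Nat) : Int) := by
    unfold pvNx
    split
    · rw [show ((j : Int) + 1) = ((n : Nat) : Int) by omega, Nat.cast_zero]
      exact Int.emod_self
    · rw [Int.emod_eq_of_lt (by omega) (by omega)]; omega
  rw [h, Int.toNat_natCast]

-- pvFireB with the modular indices resolved to pvPv / pvNx
lemma pvFireB_eq (n : Nat) (st : List Int × PySem.Set Nat) (i : Nat) (hi : i < n) :
    pvFireB n st i =
      (pvAddAt (pvAddAt (pvAddAt st.1 i (-2)) (pvPv n i) 1) (pvNx n i) 1,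
       PySem.Set.add (PySem.Set.add (PySem.Set.add st.2 i) (pvPv n i)) (pvNx n i)) := by
  simp only [pvFireB, pvMod_pred n i hi, pvMod_succ n i hi]

-- the fold of pvFireB preserves the state's length
lemma length_foldl_fireB (n : Nat) (l : List Nat) (c : List Int) (s : PySem.Set Nat)
    (hl : ∀ i ∈ l, i < n) (hc : c.length = n) :
    ((l.foldl (pvFireB n) (c, s)).1).length = n := by
  induction l generalizing c s with
  | nil => simpa
  | cons i l ih =>
      have hi : i < n := hl i (by simp)
      rw [List.foldl_cons, pvFireB_eq n (c, s) i hi]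
      exact ih _ _ (fun j hj => hl j (by simp [hj]))
        (by simp only [length_pvAddAt]; exact hc)

-- first component of the fold: each cell accumulates the contributions of the fired cells
lemma getD_foldl_fireB (n : Nat) (l : List Nat) (c : List Int) (s : PySem.Set Nat) (j : Nat)
    (hl : ∀ i ∈ l, i < n) (hc : c.length = n) :
    ((l.foldl (pvFireB n) (c, s)).1).getD j 0
      = c.getD j 0 + (l.map (pvContrib n j)).sum := by
  induction l generalizing c s with
  | nil => simp
  | cons i l ih =>
      have hi : i < n := hl i (by simp)
      have h1 : (pvAddAt c i (-2)).length = n := by rw [length_pvAddAt]; exact hc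
      have h2 : (pvAddAt (pvAddAt c i (-2)) (pvPv n i) 1).length = n := by
        rw [length_pvAddAt]; exact h1
      rw [List.foldl_cons, pvFireB_eq n (c, s) i hi,
          ih _ _ (fun k hk => hl k (by simp [hk])) (by rw [length_pvAddAt]; exact h2)]
      rw [getD_pvAddAt _ _ _ _ (by rw [h2]; exact pvNx_lt hi),
          getD_pvAddAt _ _ _ _ (by rw [h1]; exact pvPv_lt hi),
          getD_pvAddAt _ _ _ _ (by rw [hc]; exact hi)]
      simp only [List.map_cons, List.sum_cons, pvContrib]
      ring

-- second component of the fold: the touched set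
lemma mem_foldl_fireB_touched (n : Nat) (l : List Nat) (c : List Int) (s : PySem.Set Nat)
    (j : Nat) (hl : ∀ i ∈ l, i < n) :
    (j ∈ (l.foldl (pvFireB n) (c, s)).2) ↔
      j ∈ s ∨ ∃ i ∈ l, j = i ∨ j = pvPv n i ∨ j = pvNx n i := by
  induction l generalizing c s with
  | nil => simp
  | cons i l ih =>
      have hi : i < n := hl i (by simp)
      rw [List.foldl_cons, pvFireB_eq n (c, s) i hi,
          ih _ _ (fun k hk => hl k (by simp [hk]))]
      simp only [PySem.Set.mem_add, List.mem_cons]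
      constructor
      · rintro ((((h1 | h2) | h3) | h4) | ⟨k, hk, hj⟩)
        · exact Or.inl h1
        · exact Or.inr ⟨i, Or.inl rfl, Or.inl h2⟩
        · exact Or.inr ⟨i, Or.inl rfl, Or.inr (Or.inl h3)⟩
        · exact Or.inr ⟨i, Or.inl rfl, Or.inr (Or.inr h4)⟩
        · exact Or.inr ⟨k, Or.inr hk, hj⟩
      · rintro (h | ⟨k, (rfl | hk), hj⟩)
        · exact Or.inl (Or.inl (Or.inl (Or.inl h)))
        · rcases hj with h | h | h
          · exact Or.inl (Or.inl (Or.inl (Or.inr h)))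
          · exact Or.inl (Or.inl (Or.inr h))
          · exact Or.inl (Or.inr h)
        · exact Or.inr ⟨k, hk, hj⟩

lemma nodup_foldl_fireB_touched (n : Nat) (l : List Nat) (c : List Int) (s : PySem.Set Nat)
    (hs : s.Nodup) : ((l.foldl (pvFireB n) (c, s)).2).Nodup := by
  induction l generalizing c s with
  | nil => simpa
  | cons i l ih =>
      rw [List.foldl_cons]
      refine ih _ _ ?_
      apply PySem.Set.nodup_add
      apply PySem.Set.nodup_add
      apply PySem.Set.nodup_add
      exact hs

-- evaluating the contribution sum over a duplicate-free active list
-- sum of a single indicator over a duplicate-free list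
lemma pvSum_ind (l : List Nat) (a : Int) (x : Nat) (hnd : l.Nodup) :
    (l.map (fun i => if x = i then a else 0)).sum = if x ∈ l then a else 0 := by
  induction l with
  | nil => simp
  | cons i l ih =>
      rcases List.nodup_cons.mp hnd with ⟨hni, hl⟩
      simp only [List.map_cons, List.sum_cons, List.mem_cons]
      by_cases h : x = i
      · subst h; simp [hni, ih hl]
      · simp [h, ih hl]

lemma sum_contrib (n : Nat) (l : List Nat) (j : Nat) (hj : j < n)
    (hl : ∀ i ∈ l, i < n) (hnd : l.Nodup) :
    (l.map (pvContrib n j)).sum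
      = (if j ∈ l then -2 else 0) + (if pvNx n j ∈ l then 1 else 0)
        + (if pvPv n j ∈ l then 1 else 0) := by
  have key : (l.map (pvContrib n j)).sum
      = (l.map (fun i => if j = i then (-2 : Int) else 0)).sum
        + (l.map (fun i => if j = pvPv n i then (1 : Int) else 0)).sum
        + (l.map (fun i => if j = pvNx n i then (1 : Int) else 0)).sum := by
    clear hl hnd
    induction l with
    | nil => simp
    | cons i l ih =>
        simp only [List.map_cons, List.sum_cons, pvContrib, ih]
        ring
  have e2 : l.map (fun i => if j = pvPv n i then (1 : Int) else 0)
      = l.map (fun i => if pvNx n j = i then (1 : Int) else 0) :=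
    List.map_congr_left (fun i hi =>
      if_congr ((pvNx_eq_iff hj (hl i hi)).symm) rfl rfl)
  have e3 : l.map (fun i => if j = pvNx n i then (1 : Int) else 0)
      = l.map (fun i => if pvPv n j = i then (1 : Int) else 0) :=
    List.map_congr_left (fun i hi =>
      if_congr ((pvPv_eq_iff hj (hl i hi)).symm) rfl rfl)
  rw [key, e2, e3, pvSum_ind l _ j hnd, pvSum_ind l _ (pvNx n j) hnd,
      pvSum_ind l _ (pvPv n j) hnd]

-- one round of B (the fold + filter) computes A's round and restores the invariant
lemma pvRoundB_state (n : Nat) (c : List Int) (active : List Nat) (hinv : pvInv n c active) :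
    ((active.foldl (pvFireB n) (c, PySem.Set.empty)).1) = pvRoundA c := by
  obtain ⟨hc, hnd, hbd, hmem⟩ := hinv
  have hlen : ((active.foldl (pvFireB n) (c, PySem.Set.empty)).1).length = n :=
    length_foldl_fireB n active c _ hbd hc
  apply pvGetDext (by rw [hlen]; subst hc; simp [pvRoundA, pvRoundA_invariant c c.length le_rfl, pvNewK])
  intro j hj
  rw [hlen] at hj
  have hjn : j < c.length := by omega
  rw [getD_foldl_fireB n active c _ j hbd hc,
      sum_contrib n active j hj hbd hnd]
  have hRA : (pvRoundA c).getD j 0 =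
      (if j < c.length then c.getD j 0 - (if 2 ≤ c.getD j 0 then 2 else 0) else 0)
      + (if 2 ≤ c.getD (pvNx c.length j) 0 ∧ pvNx c.length j < c.length then 1 else 0)
      + (if 2 ≤ c.getD (pvPv c.length j) 0 ∧ pvPv c.length j < c.length then 1 else 0) := by
    unfold pvRoundA
    rw [pvRoundA_invariant c c.length le_rfl]
    exact getD_pvNewK c c.length j hjn
  rw [hRA]
  have e1 : (j ∈ active) ↔ 2 ≤ c.getD j 0 := hmem j hj
  have e2 : (pvNx n j ∈ active) ↔ 2 ≤ c.getD (pvNx n j) 0 := hmem _ (pvNx_lt hj)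
  have e3 : (pvPv n j ∈ active) ↔ 2 ≤ c.getD (pvPv n j) 0 := hmem _ (pvPv_lt hj)
  subst hc
  have hx := pvNx_lt hj
  have hp := pvPv_lt hj
  simp only [e1, e2, e3]
  split_ifs <;> omega

lemma pvRoundB_inv (n : Nat) (c : List Int) (active : List Nat) (hinv : pvInv n c active) :
    pvInv n ((active.foldl (pvFireB n) (c, PySem.Set.empty)).1)
      (((active.foldl (pvFireB n) (c, PySem.Set.empty)).2).filter
        (fun j => decide (2 ≤ ((active.foldl (pvFireB n) (c, PySem.Set.empty)).1).getD j 0))) := by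
  obtain ⟨hc, hnd, hbd, hmem⟩ := hinv
  set st := active.foldl (pvFireB n) (c, PySem.Set.empty) with hst
  have hlen : st.1.length = n := length_foldl_fireB n active c _ hbd hc
  refine ⟨hlen, List.Nodup.filter _ (nodup_foldl_fireB_touched n active c _ (by simp)), ?_, ?_⟩
  · intro i hi
    have := (List.mem_filter.mp hi).1
    rw [mem_foldl_fireB_touched n active c _ i hbd] at this
    rcases this with h | ⟨k, hk, h⟩
    · simp [PySem.Set.empty] at h
    · have hkn := hbd k hk
      rcases h with rfl | rfl | rfl
      · exact hkn
      · exact pvPv_lt hkn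
      · exact pvNx_lt hkn
  · intro j hj
    constructor
    · intro h
      have := (List.mem_filter.mp h).2
      simpa using this
    · intro h2
      refine List.mem_filter.mpr ⟨?_, by simpa using h2⟩
      rw [mem_foldl_fireB_touched n active c _ j hbd]
      by_cases htouch : j ∈ active ∨ pvNx n j ∈ active ∨ pvPv n j ∈ active
      · rcases htouch with h | h | h
        · exact Or.inr ⟨j, h, Or.inl rfl⟩
        · exact Or.inr ⟨pvNx n j, h, Or.inr (Or.inl ((pvNx_eq_iff hj (pvNx_lt hj)).mp rfl))⟩
        · exact Or.inr ⟨pvPv n j, h, Or.inr (Or.inr ((pvPv_eq_iff hj (pvPv_lt hj)).mp rfl))⟩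
      · -- untouched cell: its value is unchanged and was < 2, contradiction
        rw [not_or, not_or] at htouch
        obtain ⟨hja, hxa, hpa⟩ := htouch
        exfalso
        have hval : st.1.getD j 0 = c.getD j 0 := by
          rw [hst, getD_foldl_fireB n active c _ j hbd hc,
              sum_contrib n active j hj hbd hnd]
          simp [hja, hxa, hpa]
        have : 2 ≤ c.getD j 0 := by rw [← hval]; exact h2
        exact hja ((hmem j hj).mpr this)

-- A's guard and B's guard agree under the invariant
lemma guard_iff (n : Nat) (c : List Int) (active : List Nat) (hinv : pvInv n c active) :
    (c.any (fun v => decide (2 ≤ v)) = true) ↔ active ≠ [] := by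
  obtain ⟨hc, _, hbd, hmem⟩ := hinv
  rw [List.any_eq_true]
  constructor
  · rintro ⟨v, hv, h2⟩
    obtain ⟨j, hj, rfl⟩ := List.mem_iff_getElem.mp hv
    have : j ∈ active := (hmem j (by omega)).mpr
      (by rw [List.getD_eq_getElem _ _ hj]; simpa using h2)
    intro hnil; rw [hnil] at this; simp at this
  · intro hne
    obtain ⟨i, hi⟩ := List.exists_mem_of_ne_nil active hne
    have hin := hbd i hi
    have h2 : 2 ≤ c.getD i 0 := (hmem i hin).mp hi
    refine ⟨c.getD i 0, ?_, by simpa using h2⟩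
    rw [List.getD_eq_getElem _ _ (by omega)]
    exact List.getElem_mem _

-- the two loops agree under the invariant, for any fuel
lemma pvLoop_eq (n fuel : Nat) (rounds : Int) (c : List Int) (active : List Nat)
    (hinv : pvInv n c active) :
    pvLoopA fuel rounds c = pvLoopB n fuel rounds c active := by
  induction fuel generalizing rounds c active with
  | zero => rfl
  | succ fuel ih =>
      simp only [pvLoopA, pvLoopB]
      have hg := guard_iff n c active hinv
      by_cases hne : active = []
      · have hno : ¬(c.any (fun v => decide (2 ≤ v)) = true) := by
          rw [hg]; simpa using hne
        rw [if_neg hno, if_pos hne]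
      · rw [if_neg hne, if_pos (hg.mpr hne)]
        have hstate := pvRoundB_state n c active hinv
        have hinv' := pvRoundB_inv n c active hinv
        rw [← hstate] at *
        exact ih (rounds + 1) _ _ hinv'

-- ===== VERDICT (by name: the statement is the Claim_ definition above) =====
theorem candy_share_spec : Claim_equal_candy_share := by
  intro candies _
  unfold Spec_candy_share candy_share candy_share_alt
  apply pvLoop_eq
  refine ⟨rfl, List.nodup_range.filter _, ?_, ?_⟩
  · intro i hi
    simpa using (List.mem_filter.mp hi).1
  · intro j hj
    rw [List.mem_filter]
    simp [List.mem_range, hj]
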